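-- pv_equiv track=rewrite | github.com/spamb07/TTS_epub_reader | walkEPUBStructure.py | getLikelyTextChapterRange
-- ===== SOURCE A (Python) =====
-- def getLikelyTextChapterRange(entryList, likelyTOCEntryIndex):
-- 	SSML_Lengths_List = []
-- 	for entry in entryList:
-- 		if "ssml" in entry:
-- 			SSML_Lengths_List.append(len(entry["ssml"]))
-- 		else:
-- 			SSML_Lengths_List.append(0)
--
-- 	currentIndexList = []
-- 	consecutiveIndexList = []
-- 	for index in range(len(SSML_Lengths_List)):
-- 		if SSML_Lengths_List[index] != 0:
-- 			currentIndexList.append(index)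
-- 		elif len(currentIndexList) > 0:
-- 			consecutiveIndexList.append(currentIndexList)
-- 			currentIndexList = []
--
-- 	if len(currentIndexList) > 0:
-- 			consecutiveIndexList.append(currentIndexList)
--
-- 	targetList = consecutiveIndexList[0]
-- 	for consecutiveIndexSet in consecutiveIndexList:
-- 		if len(consecutiveIndexSet) > len(targetList):
-- 			targetList = consecutiveIndexSet
--
-- 	if likelyTOCEntryIndex and likelyTOCEntryIndex >= targetList[0] and likelyTOCEntryIndex < targetList[len(targetList)-1]:
-- 		return likelyTOCEntryIndex + 1, targetList[len(targetList)-1]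
-- 	return targetList[0], targetList[len(targetList)-1]
-- ===== SOURCE B (Python) =====
-- def getLikelyTextChapterRange(entryList, likelyTOCEntryIndex):
-- 	best = None       # (start, end) of the first longest nonempty run seen so far
-- 	cur_start = None  # start of the currently open nonempty run
-- 	for i, entry in enumerate(entryList):
-- 		if len(entry.get("ssml", "")) != 0:
-- 			if cur_start is None:
-- 				cur_start = i
-- 			if best is None or i - cur_start > best[1] - best[0]:
-- 				best = (cur_start, i)
-- 		else:
-- 			cur_start = None
-- 	start, end = best
-- 	if likelyTOCEntryIndex and likelyTOCEntryIndex >= start and likelyTOCEntryIndex < end: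
-- 		return likelyTOCEntryIndex + 1, end
-- 	return start, end
-- ===== Notes on version B (the rewrite author's own statement) =====
-- stated objective: simpler
-- what changed: A builds a length list, then a list of index-run lists in a second indexed loop, then scans those runs for the longest; B is a single enumerate pass that tracks the start of the current nonempty run and the best (start, end) span directly.
import Mathlib
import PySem

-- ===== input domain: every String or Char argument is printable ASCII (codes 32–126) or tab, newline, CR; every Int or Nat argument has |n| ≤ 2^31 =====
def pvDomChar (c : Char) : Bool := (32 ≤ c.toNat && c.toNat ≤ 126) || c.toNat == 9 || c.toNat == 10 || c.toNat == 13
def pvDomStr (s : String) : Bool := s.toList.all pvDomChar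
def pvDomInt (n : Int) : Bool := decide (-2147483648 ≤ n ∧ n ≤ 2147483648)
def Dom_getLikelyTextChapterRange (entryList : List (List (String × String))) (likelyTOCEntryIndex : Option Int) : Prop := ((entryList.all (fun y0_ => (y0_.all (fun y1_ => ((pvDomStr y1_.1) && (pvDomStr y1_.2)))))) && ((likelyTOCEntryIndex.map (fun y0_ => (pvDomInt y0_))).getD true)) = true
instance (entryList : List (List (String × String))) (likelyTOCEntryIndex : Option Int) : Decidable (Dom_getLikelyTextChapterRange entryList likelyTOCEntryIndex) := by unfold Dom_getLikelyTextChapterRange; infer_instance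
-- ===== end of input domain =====

-- B is a simpler single pass: it tracks the start of the current nonempty run and the best
-- (start, end) span directly, instead of A's three phases (length list, run-of-index lists,
-- separate longest scan).  Equivalence is claimed on Pre_ (at least one nonempty "ssml").

-- ===== PORT A =====
def getLikelyTextChapterRange (entryList : List (List (String × String))) (likelyTOCEntryIndex : Option Int) : Int × Int :=
  -- SSML_Lengths_List loop
  let lens : List Int := entryList.foldl (fun acc entry =>
    match entry.find? (fun kv => kv.1 == "ssml") with
    | some kv => acc ++ [PySem.Str.len kv.2]
    | none => acc ++ [0]) []
  -- for index in range(len(SSML_Lengths_List)) loop over (currentIndexList, consecutiveIndexList)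
  let st := (PySem.List.pyRange 0 (PySem.List.len lens) 1).foldl
    (fun (st : List Int × List (List Int)) index =>
      if PySem.List.pyGetD lens index 0 ≠ 0 then (st.1 ++ [index], st.2)
      else if st.1.length > 0 then ([], st.2 ++ [st.1])
      else st) ([], [])
  let cons := if st.1.length > 0 then st.2 ++ [st.1] else st.2
  match PySem.List.pyGet? cons 0 with
  | none => (0, 0)   -- Python raises IndexError here (no nonempty chapter); excluded by Pre_
  | some first =>
    let target := cons.foldl (fun t s => if s.length > t.length then s else t) first
    let tfirst := PySem.List.pyGetD target 0 0
    let tlast := PySem.List.pyGetD target ((target.length : Int) - 1) 0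
    match likelyTOCEntryIndex with
    | some k => if k ≠ 0 ∧ tfirst ≤ k ∧ k < tlast then (k + 1, tlast) else (tfirst, tlast)
    | none => (tfirst, tlast)

-- ===== PORT B =====
def getLikelyTextChapterRange_alt (entryList : List (List (String × String))) (likelyTOCEntryIndex : Option Int) : Int × Int :=
  -- one pass over enumerate(entryList): (cur_start, best)
  let st := (PySem.List.enumerate entryList 0).foldl
    (fun (st : Option Int × Option (Int × Int)) p =>
      if PySem.Str.len (((p.2.find? (fun kv => kv.1 == "ssml")).map (fun kv => kv.2)).getD "") ≠ 0 then
        let cs := st.1.getD p.1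
        let best := match st.2 with
          | none => some (cs, p.1)
          | some (bs, be) => if p.1 - cs > be - bs then some (cs, p.1) else some (bs, be)
        (some cs, best)
      else (none, st.2)) (none, none)
  match st.2 with
  | none => (0, 0)   -- Python B raises here (best is None); excluded by Pre_
  | some (s, e) =>
    match likelyTOCEntryIndex with
    | some k => if k ≠ 0 ∧ s ≤ k ∧ k < e then (k + 1, e) else (s, e)
    | none => (s, e)

-- ===== PRECONDITION & SPEC =====
-- Pre_ excludes exactly the inputs with no nonempty "ssml" entry, on which Python A raises IndexError.
def Pre_getLikelyTextChapterRange (entryList : List (List (String × String))) (likelyTOCEntryIndex : Option Int) : Prop :=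
  entryList.any (fun e => PySem.Str.len (((e.find? (fun kv => kv.1 == "ssml")).map (fun kv => kv.2)).getD "") ≠ 0) = true
instance (entryList : List (List (String × String))) (likelyTOCEntryIndex : Option Int) : Decidable (Pre_getLikelyTextChapterRange entryList likelyTOCEntryIndex) := by unfold Pre_getLikelyTextChapterRange; infer_instance
def pvWitness_getLikelyTextChapterRange : (List (List (String × String))) × Option Int := ([[("ssml", "hello")], [], [("ssml", "ab")]], some 1)

def Spec_getLikelyTextChapterRange (entryList : List (List (String × String))) (likelyTOCEntryIndex : Option Int) (out : Int × Int) : Prop := out = getLikelyTextChapterRange_alt entryList likelyTOCEntryIndex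
instance (entryList : List (List (String × String))) (likelyTOCEntryIndex : Option Int) (out : Int × Int) : Decidable (Spec_getLikelyTextChapterRange entryList likelyTOCEntryIndex out) := by unfold Spec_getLikelyTextChapterRange; infer_instance

-- ===== CLAIM (what is proved, stated in full; the proofs are below) =====
def Claim_equal_getLikelyTextChapterRange : Prop := ∀ (entryList : List (List (String × String))) (likelyTOCEntryIndex : Option Int), Dom_getLikelyTextChapterRange entryList likelyTOCEntryIndex → Pre_getLikelyTextChapterRange entryList likelyTOCEntryIndex → Spec_getLikelyTextChapterRange entryList likelyTOCEntryIndex (getLikelyTextChapterRange entryList likelyTOCEntryIndex)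

-- ===== LEMMAS AND PROOFS =====
def pvToRun (p : Int × Int) : List Int := PySem.List.pyRange p.1 (p.2 + 1) 1
def pvStep (b : Option (Int × Int)) (p : Int × Int) : Option (Int × Int) :=
  match b with
  | none => some p
  | some (x, y) => if p.2 - p.1 > y - x then some p else some (x, y)
def pvPick (x p : Int × Int) : Int × Int := if p.2 - p.1 > x.2 - x.1 then p else x
def pvBest (l : List (Int × Int)) : Option (Int × Int) := l.foldl pvStep none
def pvWF (l : List (Int × Int)) : Prop := ∀ p ∈ l, 0 ≤ p.1 ∧ p.1 ≤ p.2

theorem pvStep_some (q p : Int × Int) : pvStep (some q) p = some (pvPick q p) := by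
  cases q; simp only [pvStep, pvPick]; split <;> rfl

theorem pvBest_cons (q : Int × Int) (t : List (Int × Int)) :
    pvBest (q :: t) = some (t.foldl pvPick q) := by
  show (q :: t).foldl pvStep none = _
  rw [List.foldl_cons]
  show t.foldl pvStep (some q) = _
  induction t generalizing q with
  | nil => rfl
  | cons p t ih => rw [List.foldl_cons, pvStep_some, List.foldl_cons, ih]

theorem pvLen_toRun (p : Int × Int) : (pvToRun p).length = (p.2 + 1 - p.1).toNat := by
  simp [pvToRun, PySem.List.length_pyRange_one]

theorem pvTarget_eq (t : List (Int × Int)) : ∀ (q : Int × Int), pvWF (q :: t) →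
    (t.map pvToRun).foldl (fun t s => if s.length > t.length then s else t) (pvToRun q)
      = pvToRun (t.foldl pvPick q) ∧ (t.foldl pvPick q) ∈ q :: t := by
  induction t with
  | nil => intro q _; simp
  | cons p t ih =>
    intro q hwf
    have hq := hwf q (by simp)
    have hp := hwf p (by simp)
    have hstep : (if (pvToRun p).length > (pvToRun q).length then pvToRun p else pvToRun q)
        = pvToRun (pvPick q p) := by
      rw [pvLen_toRun, pvLen_toRun]
      by_cases hc : p.2 - p.1 > q.2 - q.1
      · rw [if_pos (by omega), pvPick, if_pos hc]
      · rw [if_neg (by omega), pvPick, if_neg hc]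
    have hwf' : pvWF (pvPick q p :: t) := by
      intro r hr
      rw [List.mem_cons] at hr
      rcases hr with h | h
      · subst h; unfold pvPick; split_ifs <;> [exact hp; exact hq]
      · exact hwf r (by simp [h])
    obtain ⟨h1, h2⟩ := ih (pvPick q p) hwf'
    constructor
    · rw [List.map_cons, List.foldl_cons, hstep, List.foldl_cons, h1]
    · rw [List.foldl_cons]
      rw [List.mem_cons] at h2
      rcases h2 with h | h
      · rw [h]; unfold pvPick; split_ifs <;> simp
      · simp [h]

theorem pvRun_bounds (p : Int × Int) (h1 : 0 ≤ p.1) (h2 : p.1 ≤ p.2) :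
    PySem.List.pyGetD (pvToRun p) 0 0 = p.1 ∧
    PySem.List.pyGetD (pvToRun p) (((pvToRun p).length : Int) - 1) 0 = p.2 := by
  have hlen : (pvToRun p).length = (p.2 + 1 - p.1).toNat := pvLen_toRun p
  have hpos : 0 < (pvToRun p).length := by rw [hlen]; omega
  constructor
  · rw [PySem.List.pyGetD_eq_getElem]
    · simp only [pvToRun, PySem.List.getElem_pyRange_one]; simp
    · norm_num
    · simp; omega
  · rw [PySem.List.pyGetD_eq_getElem]
    · simp only [pvToRun, PySem.List.getElem_pyRange_one, PySem.List.length_pyRange_one]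
      rw [hlen] at hpos
      simp only [pvToRun, PySem.List.length_pyRange_one] at *
      omega
    · omega
    · omega

def pvLenOf (e : List (String × String)) : Int :=
  PySem.Str.len (((e.find? (fun kv => kv.1 == "ssml")).map (fun kv => kv.2)).getD "")

theorem pvLens_eq (entryList : List (List (String × String))) :
    entryList.foldl (fun acc entry =>
      match entry.find? (fun kv => kv.1 == "ssml") with
      | some kv => acc ++ [PySem.Str.len kv.2]
      | none => acc ++ [0]) [] = entryList.map pvLenOf := by
  have h : (fun (acc : List Int) (entry : List (String × String)) =>
      match entry.find? (fun kv => kv.1 == "ssml") with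
      | some kv => acc ++ [PySem.Str.len kv.2]
      | none => acc ++ [0]) = fun acc entry => acc ++ [pvLenOf entry] := by
    funext acc e
    cases h : e.find? (fun kv => kv.1 == "ssml") <;> simp [pvLenOf, h]
  rw [h, PySem.List.foldl_append_singleton_eq_map]
  simp

theorem pvEnumerate_map {α β : Type} (f : α → β) (xs : List α) (k : Int) :
    PySem.List.enumerate (xs.map f) k = (PySem.List.enumerate xs k).map (fun p => (p.1, f p.2)) := by
  induction xs generalizing k with
  | nil => simp [PySem.List.enumerate_nil]
  | cons x xs ih => simp [PySem.List.enumerate_cons, ih]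

def pvFA (st : List Int × List (List Int)) (p : Int × Int) : List Int × List (List Int) :=
  if p.2 ≠ 0 then (st.1 ++ [p.1], st.2)
  else if st.1.length > 0 then ([], st.2 ++ [st.1])
  else st
def pvFB (st : Option Int × Option (Int × Int)) (p : Int × Int) : Option Int × Option (Int × Int) :=
  if p.2 ≠ 0 then
    let cs := st.1.getD p.1
    (some cs, match st.2 with
      | none => some (cs, p.1)
      | some (bs, be) => if p.1 - cs > be - bs then some (cs, p.1) else some (bs, be))
  else (none, st.2)
def pvCur (cs : Option Int) (k : Int) : List Int :=
  match cs with | none => [] | some s => PySem.List.pyRange s k 1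
def pvOpen (cs : Option Int) (k : Int) : List (Int × Int) :=
  match cs with | none => [] | some s => [(s, k - 1)]
theorem pvBest_append (l : List (Int × Int)) (p : Int × Int) :
    pvBest (l ++ [p]) = pvStep (pvBest l) p := by
  simp [pvBest, List.foldl_append]

theorem pvFA_pos (cur : List Int) (cons : List (List Int)) (k v : Int) (hv : v ≠ 0) :
    pvFA (cur, cons) (k, v) = (cur ++ [k], cons) := by
  unfold pvFA; simp [hv]

theorem pvFB_pos (c : Option Int) (b : Option (Int × Int)) (k v : Int) (hv : v ≠ 0) :
    pvFB (c, b) (k, v) = (some (c.getD k), pvStep b (c.getD k, k)) := by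
  unfold pvFB pvStep
  rw [if_pos (by simpa using hv)]

theorem pvStep_step (b0 : Option (Int × Int)) (s k : Int) (h : s ≤ k - 1) :
    pvStep (pvStep b0 (s, k - 1)) (s, k) = pvStep b0 (s, k) := by
  cases b0 with
  | none =>
    show pvStep (some (s, k - 1)) (s, k) = some (s, k)
    simp only [pvStep]
    rw [if_pos (by simp; try omega)]
  | some q =>
    obtain ⟨x, y⟩ := q
    simp only [pvStep]
    split_ifs with h1 h2 h3 <;> simp_all <;> omega

theorem pvInv (vs : List Int) : ∀ (k : Int) (cs : Option Int) (spans : List (Int × Int)),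
    0 ≤ k → pvWF spans → (∀ s, cs = some s → 0 ≤ s ∧ s < k) →
    ∃ cs' spans', pvWF spans' ∧ (∀ s, cs' = some s → 0 ≤ s ∧ s < k + vs.length) ∧
      (PySem.List.enumerate vs k).foldl pvFA (pvCur cs k, spans.map pvToRun)
        = (pvCur cs' (k + vs.length), spans'.map pvToRun) ∧
      (PySem.List.enumerate vs k).foldl pvFB (cs, pvBest (spans ++ pvOpen cs k))
        = (cs', pvBest (spans' ++ pvOpen cs' (k + vs.length))) := by
  induction vs with
  | nil =>
    intro k cs spans hk hwf hcs
    exact ⟨cs, spans, hwf, by simpa using hcs,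
      by simp [PySem.List.enumerate_nil], by simp [PySem.List.enumerate_nil]⟩
  | cons v vs ih =>
    intro k cs spans hk hwf hcs
    rw [PySem.List.enumerate_cons]
    have hlen : k + ((v :: vs).length : Int) = (k + 1) + (vs.length : Int) := by
      simp [List.length_cons]; ring
    rw [List.foldl_cons, List.foldl_cons, hlen]
    by_cases hv : v ≠ 0
    · cases cs with
      | none =>
        have hA : pvFA (pvCur none k, spans.map pvToRun) (k, v)
            = (pvCur (some k) (k + 1), spans.map pvToRun) := by
          show pvFA ([], spans.map pvToRun) (k, v) = _
          rw [pvFA_pos _ _ _ _ hv]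
          simp [pvCur, PySem.List.pyRange_one_singleton]
        have hB : pvFB (none, pvBest (spans ++ pvOpen none k)) (k, v)
            = (some k, pvBest (spans ++ pvOpen (some k) (k + 1))) := by
          rw [show pvOpen none k = [] from rfl, List.append_nil,
            show pvOpen (some k) (k + 1) = [(k, k)] by simp [pvOpen],
            pvBest_append, pvFB_pos _ _ _ _ hv]
          rfl
        rw [hA, hB]
        exact ih (k + 1) (some k) spans (by omega) hwf
          (by intro s hs; injection hs with h; omega)
      | some s =>
        have hs := hcs s rfl
        have hA : pvFA (pvCur (some s) k, spans.map pvToRun) (k, v)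
            = (pvCur (some s) (k + 1), spans.map pvToRun) := by
          show pvFA (PySem.List.pyRange s k 1, spans.map pvToRun) (k, v) = _
          rw [pvFA_pos _ _ _ _ hv]
          show _ = (PySem.List.pyRange s (k + 1) 1, spans.map pvToRun)
          rw [PySem.List.pyRange_one_succ_right (show s ≤ k by omega)]
        have hB : pvFB (some s, pvBest (spans ++ pvOpen (some s) k)) (k, v)
            = (some s, pvBest (spans ++ pvOpen (some s) (k + 1))) := by
          rw [show pvOpen (some s) k = [(s, k - 1)] from rfl,
            show pvOpen (some s) (k + 1) = [(s, k)] by simp [pvOpen],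
            pvBest_append, pvBest_append, pvFB_pos _ _ _ _ hv]
          show (some s, pvStep (pvStep (pvBest spans) (s, k - 1)) (s, k)) = _
          rw [pvStep_step _ _ _ (by omega)]
        rw [hA, hB]
        exact ih (k + 1) (some s) spans (by omega) hwf
          (by intro t ht; injection ht with h; omega)
    · have hv0 : v = 0 := by omega
      subst hv0
      cases cs with
      | none =>
        have hA : pvFA (pvCur none k, spans.map pvToRun) (k, 0)
            = (pvCur none (k + 1), spans.map pvToRun) := by
          simp [pvFA, pvCur]
        have hB : pvFB (none, pvBest (spans ++ pvOpen none k)) (k, 0)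
            = (none, pvBest (spans ++ pvOpen none (k + 1))) := by
          simp [pvFB, pvOpen]
        rw [hA, hB]
        exact ih (k + 1) none spans (by omega) hwf (by intro s hs; cases hs)
      | some s =>
        have hs := hcs s rfl
        have hrun : pvToRun (s, k - 1) = PySem.List.pyRange s k 1 := by
          simp only [pvToRun]
          norm_num
        have hA : pvFA (pvCur (some s) k, spans.map pvToRun) (k, 0)
            = (pvCur none (k + 1), (spans ++ [(s, k - 1)]).map pvToRun) := by
          simp only [pvFA, pvCur, List.map_append, List.map_cons, List.map_nil]
          rw [if_neg (by simp), if_pos (by rw [PySem.List.length_pyRange_one]; omega), hrun]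
        have hB : pvFB (some s, pvBest (spans ++ pvOpen (some s) k)) (k, 0)
            = (none, pvBest ((spans ++ [(s, k - 1)]) ++ pvOpen none (k + 1))) := by
          simp [pvFB, pvOpen]
        rw [hA, hB]
        refine ih (k + 1) none (spans ++ [(s, k - 1)]) (by omega) ?_ (by intro t ht; cases ht)
        intro p hp
        rw [List.mem_append] at hp
        rcases hp with h | h
        · exact hwf p h
        · simp at h; subst h; constructor <;> omega

theorem pvMain (entryList : List (List (String × String))) (toc : Option Int) :
    getLikelyTextChapterRange entryList toc = getLikelyTextChapterRange_alt entryList toc := by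
  simp only [getLikelyTextChapterRange, getLikelyTextChapterRange_alt]
  rw [pvLens_eq]
  have eA : (PySem.List.pyRange 0 (PySem.List.len (entryList.map pvLenOf)) 1).foldl
      (fun (st : List Int × List (List Int)) index =>
        if PySem.List.pyGetD (entryList.map pvLenOf) index 0 ≠ 0 then (st.1 ++ [index], st.2)
        else if st.1.length > 0 then ([], st.2 ++ [st.1])
        else st) ([], [])
      = (PySem.List.enumerate (entryList.map pvLenOf) 0).foldl pvFA ([], []) := by
    rw [PySem.List.enumerate_eq_map_pyRange (d := 0), List.foldl_map]
    rfl
  have eB : (PySem.List.enumerate entryList 0).foldl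
      (fun (st : Option Int × Option (Int × Int)) p =>
        if PySem.Str.len (((p.2.find? (fun kv => kv.1 == "ssml")).map (fun kv => kv.2)).getD "") ≠ 0 then
          let cs := st.1.getD p.1
          (some cs, match st.2 with
            | none => some (cs, p.1)
            | some (bs, be) => if p.1 - cs > be - bs then some (cs, p.1) else some (bs, be))
        else (none, st.2)) (none, none)
      = (PySem.List.enumerate (entryList.map pvLenOf) 0).foldl pvFB (none, none) := by
    rw [pvEnumerate_map, List.foldl_map]
    rfl
  rw [eA, eB]
  obtain ⟨cs', spans', hwf', hb', hA, hB⟩ :=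
    pvInv (entryList.map pvLenOf) 0 none [] (le_refl 0)
      (by intro p hp; cases hp) (by intro s hs; cases hs)
  simp only [zero_add] at hA hB hb'
  have hA' : (PySem.List.enumerate (entryList.map pvLenOf) 0).foldl pvFA ([], [])
      = (pvCur cs' ((entryList.map pvLenOf).length : Int), spans'.map pvToRun) := hA
  have hB' : (PySem.List.enumerate (entryList.map pvLenOf) 0).foldl pvFB (none, none)
      = (cs', pvBest (spans' ++ pvOpen cs' ((entryList.map pvLenOf).length : Int))) := hB
  rw [hA', hB']
  dsimp only
  have hcons : (if (pvCur cs' ((entryList.map pvLenOf).length : Int)).length > 0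
        then spans'.map pvToRun ++ [pvCur cs' ((entryList.map pvLenOf).length : Int)]
        else spans'.map pvToRun)
      = (spans' ++ pvOpen cs' ((entryList.map pvLenOf).length : Int)).map pvToRun := by
    cases cs' with
    | none => simp [pvCur, pvOpen]
    | some s =>
      obtain ⟨hs0, hsL⟩ := hb' s rfl
      simp only [pvCur, pvOpen, List.map_append, List.map_cons, List.map_nil]
      rw [if_pos (by rw [PySem.List.length_pyRange_one]; omega)]
      have : pvToRun (s, ((entryList.map pvLenOf).length : Int) - 1)
          = PySem.List.pyRange s ((entryList.map pvLenOf).length : Int) 1 := by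
        simp only [pvToRun]; norm_num
      rw [this]
  have hwfall : pvWF (spans' ++ pvOpen cs' ((entryList.map pvLenOf).length : Int)) := by
    intro p hp
    rw [List.mem_append] at hp
    rcases hp with h | h
    · exact hwf' p h
    · cases cs' with
      | none => cases h
      | some s =>
        obtain ⟨hs0, hsL⟩ := hb' s rfl
        simp only [pvOpen, List.mem_singleton] at h
        subst h
        show 0 ≤ s ∧ s ≤ ((entryList.map pvLenOf).length : Int) - 1
        omega
  rw [hcons]
  cases hall : spans' ++ pvOpen cs' ((entryList.map pvLenOf).length : Int) with
  | nil =>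
    simp [PySem.List.pyGet?_zero, pvBest]
  | cons q t =>
    rw [hall] at hwfall
    rw [pvBest_cons]
    obtain ⟨htgt, hmem⟩ := pvTarget_eq t q hwfall
    generalize hr : t.foldl pvPick q = r at htgt hmem
    obtain ⟨r1, r2⟩ := r
    obtain ⟨hr0, hr12⟩ := hwfall (r1, r2) hmem
    obtain ⟨hf, hl⟩ := pvRun_bounds (r1, r2) hr0 hr12
    rw [List.map_cons, PySem.List.pyGet?_zero_cons]
    simp only [List.foldl_cons]
    rw [if_neg (by omega), htgt, hf, hl]

-- ===== VERDICT (by name: the statement is the Claim_ definition above) =====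
theorem getLikelyTextChapterRange_spec : Claim_equal_getLikelyTextChapterRange := by
  unfold Claim_equal_getLikelyTextChapterRange
  intro entryList toc _ _
  unfold Spec_getLikelyTextChapterRange
  exact pvMain entryList toc
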